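-- pv_equiv track=rewrite | github.com/tomasarrufat/InfoCanvas | src/exporter.py | _replace_relative_font_sizes
-- ===== SOURCE A (Python) =====
-- def _replace_relative_font_sizes(html_fragment, base_font_px):
--     """Convert CSS relative font sizes like 'xx-large' to pixel values."""
--     size_map = {
--         "xx-small": 0.6,
--         "x-small": 0.75,
--         "small": 0.8,
--         "medium": 1.0,
--         "large": 1.2,
--         "x-large": 1.5,
--         "xx-large": 2.0,
--     }
--     for name, factor in size_map.items():
--         px = int(round(base_font_px * factor))
--         html_fragment = html_fragment.replace(f"font-size:{name};", f"font-size:{px}px;")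
--     return html_fragment
-- ===== SOURCE B (Python) =====
-- def _replace_relative_font_sizes(html_fragment, base_font_px):
--     """Convert CSS relative font sizes like 'xx-large' to pixel values.
--
--     One left-to-right scan: at each position match the literal token
--     'font-size:NAME;' against the size map instead of running seven
--     whole-string .replace() passes.
--     """
--     size_map = {
--         "xx-small": 0.6,
--         "x-small": 0.75,
--         "small": 0.8,
--         "medium": 1.0,
--         "large": 1.2,
--         "x-large": 1.5,
--         "xx-large": 2.0,
--     }
--     s = html_fragment
--     n = len(s)
--     out = []
--     i = 0
--     while i < n:
--         if s.startswith("font-size:", i):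
--             j = i + 10
--             while j < n and s[j] != ";":
--                 j += 1
--             if j < n:
--                 name = s[i + 10:j]
--                 if name in size_map:
--                     px = int(round(base_font_px * size_map[name]))
--                     out.append(f"font-size:{px}px;")
--                     i = j + 1
--                     continue
--         out.append(s[i])
--         i += 1
--     return "".join(out)
-- ===== Notes on version B (the rewrite author's own statement) =====
-- stated objective: alternative
-- what changed: A runs seven sequential whole-string str.replace passes (one per size keyword); B makes a single left-to-right scan that matches the literal token 'font-size:NAME;' at each position and looks NAME up in the size map, emitting the pixel replacement as it goes.
import Mathlib
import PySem

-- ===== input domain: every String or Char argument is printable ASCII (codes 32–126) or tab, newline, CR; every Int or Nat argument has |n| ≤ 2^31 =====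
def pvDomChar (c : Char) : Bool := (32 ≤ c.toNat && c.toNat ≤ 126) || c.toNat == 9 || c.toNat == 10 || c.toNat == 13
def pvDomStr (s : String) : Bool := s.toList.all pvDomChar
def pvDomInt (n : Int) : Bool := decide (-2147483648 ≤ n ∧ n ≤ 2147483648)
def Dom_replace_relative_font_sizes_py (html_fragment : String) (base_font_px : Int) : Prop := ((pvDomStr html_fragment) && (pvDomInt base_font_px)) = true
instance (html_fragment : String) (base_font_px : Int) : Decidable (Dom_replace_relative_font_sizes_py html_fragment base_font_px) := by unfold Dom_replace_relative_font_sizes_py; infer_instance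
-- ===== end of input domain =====

-- B replaces A's seven sequential whole-string .replace() passes by ONE left-to-right scan
-- that matches the literal token `font-size:NAME;` against the size map (objective: alternative).

-- ===== PORT A =====

-- round-half-to-even of a / 2^k (the rounding CPython's float arithmetic and round() use)
def pvRNE (a : Nat) (k : Nat) : Nat :=
  if k = 0 then a
  else
    let q := a / 2 ^ k
    let r := a % 2 ^ k
    let h := 2 ^ (k - 1)
    if h < r then q + 1 else if r < h then q else if q % 2 = 1 then q + 1 else q

def pvBits (a : Nat) : Nat := if a = 0 then 0 else a.log2 + 1

-- exact model of Python's  int(round(n * f))  where the float literal f equals m / 2^e: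
-- the exact product n*m/2^e is rounded to a 53-bit significand (IEEE double, half-to-even),
-- then round() rounds that double to an integer, half to even; sign handled symmetrically.
-- Checked against CPython for |n| ≤ 2^31 (the stated domain).
def pvPx (n : Int) (m e : Nat) : Int :=
  let a := n.natAbs * m
  let L := pvBits a
  let v : Nat := if L ≤ 53 then pvRNE a e else pvRNE (pvRNE a (L - 53)) (e - (L - 53))
  if n < 0 then -(v : Int) else (v : Int)

def pvFS : List Char := ['f', 'o', 'n', 't', '-', 's', 'i', 'z', 'e', ':']

-- the size_map of A: name ↦ (m, e) with factor = m / 2^e (exact value of the float literal)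
def pvSizeMap : List (List Char × Nat × Nat) :=
  [ (['x','x','-','s','m','a','l','l'], 5404319552844595, 53),   -- 0.6
    (['x','-','s','m','a','l','l'],     3,                2),    -- 0.75
    (['s','m','a','l','l'],             3602879701896397, 52),   -- 0.8
    (['m','e','d','i','u','m'],         1,                0),    -- 1.0
    (['l','a','r','g','e'],             5404319552844595, 52),   -- 1.2
    (['x','-','l','a','r','g','e'],     3,                1),    -- 1.5
    (['x','x','-','l','a','r','g','e'], 2,                0) ]   -- 2.0

def pvTok (nm : List Char) : List Char := pvFS ++ nm ++ [';']        -- f"font-size:{name};"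

def pvRepTok (base : Int) (fe : Nat × Nat) : List Char :=            -- f"font-size:{px}px;"
  pvFS ++ PySem.Int.toChars (pvPx base fe.1 fe.2) ++ ['p', 'x', ';']

def replace_relative_font_sizes_py (html_fragment : String) (base_font_px : Int) : String :=
  String.ofList <|
    pvSizeMap.foldl
      (fun acc p => PySem.Chars.replace acc (pvTok p.1) (pvRepTok base_font_px p.2))
      html_fragment.toList

-- ===== PORT B =====

-- B-side copy of the int(round(base * factor)) model (B computes the same Python expression;
-- its port keeps its own copy of the float model so B's closure is self-contained)
def altHalfEven (a : Nat) (k : Nat) : Nat :=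
  if k = 0 then a
  else
    let q := a / 2 ^ k
    let r := a % 2 ^ k
    let h := 2 ^ (k - 1)
    if h < r then q + 1 else if r < h then q else if q % 2 = 1 then q + 1 else q

def altWidth (a : Nat) : Nat := if a = 0 then 0 else a.log2 + 1

def altScale (n : Int) (m e : Nat) : Int :=
  let a := n.natAbs * m
  let L := altWidth a
  let v : Nat := if L ≤ 53 then altHalfEven a e else altHalfEven (altHalfEven a (L - 53)) (e - (L - 53))
  if n < 0 then -(v : Int) else (v : Int)

-- Source B's size_map, keys as the string literals (factor = m / 2^e, exact float value)
def altMap : List (List Char × Nat × Nat) :=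
  [ ("xx-small".toList, 5404319552844595, 53),
    ("x-small".toList,  3,                2),
    ("small".toList,    3602879701896397, 52),
    ("medium".toList,   1,                0),
    ("large".toList,    5404319552844595, 52),
    ("x-large".toList,  3,                1),
    ("xx-large".toList, 2,                0) ]

def altPrefix : List Char := "font-size:".toList

def altRep (base : Int) (fe : Nat × Nat) : List Char :=              -- f"font-size:{px}px;"
  altPrefix ++ PySem.Int.toChars (altScale base fe.1 fe.2) ++ "px;".toList

-- Source B's token test at the current position: `s.startswith("font-size:", i)`, the inner
-- `while j < n and s[j] != ";"` scan (the takeWhile; `j < n` is nm.length < rest.length),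
-- and the dict membership + lookup (PySem.Dict.get?); `some fe` = the token matched.
def altHit (l : List Char) : Option (Nat × Nat) :=
  if PySem.Chars.startswith l altPrefix
      ∧ ((l.drop 10).takeWhile (fun x => x ≠ ';')).length < (l.drop 10).length
  then PySem.Dict.get? (PySem.Dict.mk altMap) ((l.drop 10).takeWhile (fun x => x ≠ ';'))
  else none

-- Source B's while-loop over positions i, rendered as recursion on the remaining suffix s[i:]
def altGo (base : Int) (l : List Char) : List Char :=
  match l with
  | [] => []
  | c :: t =>
    match altHit (c :: t) with
    | some fe =>
        altRep base fe
          ++ altGo base (((c :: t).drop 10).drop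
                ((((c :: t).drop 10).takeWhile (fun x => x ≠ ';')).length + 1))
    | none => c :: altGo base t
termination_by l.length
decreasing_by
  · simp only [List.length_drop, List.length_cons]; omega
  · simp

def replace_relative_font_sizes_py_alt (html_fragment : String) (base_font_px : Int) : String :=
  String.ofList (altGo base_font_px html_fragment.toList)

-- ===== PRECONDITION & SPEC =====
def Spec_replace_relative_font_sizes_py (html_fragment : String) (base_font_px : Int) (out : String) : Prop := out = replace_relative_font_sizes_py_alt html_fragment base_font_px
instance (html_fragment : String) (base_font_px : Int) (out : String) : Decidable (Spec_replace_relative_font_sizes_py html_fragment base_font_px out) := by unfold Spec_replace_relative_font_sizes_py; infer_instance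

-- ===== CLAIM (what is proved, stated in full; the proofs are below) =====
def Claim_equal_replace_relative_font_sizes_py : Prop := ∀ (html_fragment : String) (base_font_px : Int), Dom_replace_relative_font_sizes_py html_fragment base_font_px → Spec_replace_relative_font_sizes_py html_fragment base_font_px (replace_relative_font_sizes_py html_fragment base_font_px)

-- ===== LEMMAS AND PROOFS =====

-- ---- bridges between B's own tables/helpers and A-side names ----
lemma pv_altMap_eq : altMap = pvSizeMap := by decide

lemma pv_altPrefix_eq : altPrefix = pvFS := by decide

lemma pv_altScale_eq : altScale = pvPx := rfl

lemma pv_altRep_eq (base : Int) (fe : Nat × Nat) : altRep base fe = pvRepTok base fe := by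
  simp [altRep, pvRepTok, pv_altPrefix_eq, pv_altScale_eq]

-- Python's str.replace(old, new) for old ≠ '', as direct structural recursion
def pvRepl (old rep : List Char) (l : List Char) : List Char :=
  match l with
  | [] => []
  | c :: t =>
    if old.isPrefixOf (c :: t) then rep ++ pvRepl old rep ((c :: t).drop (max old.length 1))
    else c :: pvRepl old rep t
termination_by l.length
decreasing_by
  · have := Nat.le_max_right old.length 1
    simp only [List.length_drop, List.length_cons]; omega
  · simp

-- A's fold, with pvRepl in place of PySem.Chars.replace
def pvFoldR (base : Int) (ms : List (List Char × Nat × Nat)) (l : List Char) : List Char :=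
  ms.foldl (fun acc p => pvRepl (pvTok p.1) (pvRepTok base p.2) acc) l

lemma pvFoldR_cons (base : Int) (p : List Char × Nat × Nat) (ms : List (List Char × Nat × Nat))
    (l : List Char) :
    pvFoldR base (p :: ms) l = pvFoldR base ms (pvRepl (pvTok p.1) (pvRepTok base p.2) l) := rfl

-- "no size token is a prefix of l"
def pvNoTok (l : List Char) : Prop := ∀ p ∈ pvSizeMap, ¬ (pvTok p.1 <+: l)

-- ---- decidable facts about the seven concrete tokens ----
lemma pvTok_ne_nil (nm : List Char) : pvTok nm ≠ [] := by simp [pvTok, pvFS]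

set_option maxRecDepth 4000 in
lemma pvTok_cons : ∀ p ∈ pvSizeMap, pvTok p.1 = 'f' :: (pvTok p.1).drop 1 := by decide

set_option maxRecDepth 4000 in
lemma pvTok_drop1_nof' : ∀ p ∈ pvSizeMap, ((pvTok p.1).drop 1).all (fun c => c != 'f') = true := by decide

lemma pvTok_drop1_nof : ∀ p ∈ pvSizeMap, ∀ c ∈ (pvTok p.1).drop 1, c ≠ 'f' := by
  intro p hp c hc
  simpa using List.all_eq_true.mp (pvTok_drop1_nof' p hp) c hc

set_option maxRecDepth 4000 in
lemma pvTok_len : ∀ p ∈ pvSizeMap, 10 < (pvTok p.1).length ∧ (pvTok p.1).length ≤ 19 := by decide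

set_option maxRecDepth 4000 in
lemma pvTok_get10' : ∀ p ∈ pvSizeMap, ((pvTok p.1)[10]?).any (fun c => 100 ≤ c.toNat) = true := by decide

lemma pvTok_get10 : ∀ p ∈ pvSizeMap, ∃ c, (pvTok p.1)[10]? = some c ∧ 100 ≤ c.toNat := by
  intro p hp
  have h := pvTok_get10' p hp
  cases hx : (pvTok p.1)[10]? with
  | none => rw [hx] at h; simp [Option.any] at h
  | some c => rw [hx] at h; exact ⟨c, rfl, by simpa [Option.any] using h⟩

set_option maxRecDepth 4000 in
lemma pvTok_mism : ∀ p ∈ pvSizeMap, ∀ q ∈ pvSizeMap, p.1 ≠ q.1 →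
    ∃ n, n < 19 ∧ ((pvTok p.1)[n]?).isSome ∧ (pvTok p.1)[n]? ≠ (pvTok q.1)[n]? ∧ n < (pvTok q.1).length := by decide

set_option maxRecDepth 4000 in
lemma pvKeysNodup : (pvSizeMap.map Prod.fst).Nodup := by decide

set_option maxRecDepth 4000 in
lemma pvNmNoSemi' : ∀ p ∈ pvSizeMap, p.1.all (fun c => c != ';') = true := by decide

lemma pvNmNoSemi : ∀ p ∈ pvSizeMap, ∀ c ∈ p.1, c ≠ ';' := by
  intro p hp c hc
  simpa using List.all_eq_true.mp (pvNmNoSemi' p hp) c hc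

-- ---- generic: a mismatching index kills prefix-hood ----
lemma pv_not_prefix_of_mismatch {a b : List Char} (n : Nat) (h1 : (a[n]?).isSome)
    (h2 : a[n]? ≠ b[n]?) (h3 : n < b.length) (v : List Char) : ¬ a <+: (b ++ v) := by
  intro hp
  obtain ⟨u, hu⟩ := hp
  have hn : n < a.length := by
    by_contra h
    simp [List.getElem?_eq_none (by omega : a.length ≤ n)] at h1
  exact h2 (by rw [← List.getElem?_append_left (l₂ := u) hn, hu, List.getElem?_append_left h3])

-- ---- digits of str(n) ----
def pvIsNum (c : Char) : Bool := (48 ≤ c.toNat && c.toNat ≤ 57) || c.toNat == 45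

lemma pv_digitChar_range (k : Nat) (hk : k < 10) :
    48 ≤ (Nat.digitChar k).toNat ∧ (Nat.digitChar k).toNat ≤ 57 := by
  interval_cases k <;> decide

lemma pv_toDigitsCore_digits :
    ∀ fuel n (acc : List Char), (∀ c ∈ acc, 48 ≤ c.toNat ∧ c.toNat ≤ 57) →
      ∀ c ∈ Nat.toDigitsCore 10 fuel n acc, 48 ≤ c.toNat ∧ c.toNat ≤ 57 := by
  intro fuel
  induction fuel with
  | zero => intro n acc hacc; simpa [Nat.toDigitsCore] using hacc
  | succ g ih =>
    intro n acc hacc c hc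
    rw [Nat.toDigitsCore] at hc
    have hd := pv_digitChar_range (n % 10) (by omega)
    by_cases h0 : n / 10 = 0
    · simp only [h0] at hc
      rcases List.mem_cons.mp hc with hc | hc
      · exact hc ▸ hd
      · exact hacc _ hc
    · simp only [if_neg h0] at hc
      exact ih (n / 10) _ (by intro x hx; rcases List.mem_cons.mp hx with rfl | hx; exact hd; exact hacc _ hx) c hc

lemma pv_toDigitsCore_len :
    ∀ fuel n (acc : List Char), acc.length < (Nat.toDigitsCore 10 (fuel + 1) n acc).length := by
  intro fuel
  induction fuel with
  | zero => intro n acc; rw [Nat.toDigitsCore]; split <;> simp [Nat.toDigitsCore]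
  | succ g ih =>
    intro n acc
    rw [Nat.toDigitsCore]
    split
    · simp
    · exact Nat.lt_trans (by simp) (ih (n / 10) _)

lemma pv_toChars_num (x : Int) :
    PySem.Int.toChars x ≠ [] ∧ ∀ c ∈ PySem.Int.toChars x, pvIsNum c := by
  have hdig : ∀ n : Nat, ∀ c ∈ Nat.toDigits 10 n, pvIsNum c := by
    intro n c hc
    have := pv_toDigitsCore_digits (n + 1) n [] (by simp) c hc
    simp [pvIsNum]; omega
  have hne : ∀ n : Nat, Nat.toDigits 10 n ≠ [] := by
    intro n h
    have := pv_toDigitsCore_len n n []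
    rw [Nat.toDigits] at h; rw [h] at this; simp at this
  unfold PySem.Int.toChars
  split
  · refine ⟨by simp, ?_⟩
    intro c hc
    rcases List.mem_cons.mp hc with rfl | hc
    · decide
    · exact hdig _ _ hc
  · exact ⟨hne _, hdig _⟩

lemma pvIsNum_ne (c : Char) (h : pvIsNum c) : c.toNat ≤ 57 ∨ c.toNat = 45 := by
  simp [pvIsNum] at h; omega

-- ---- structure of the replacement text ----
lemma pvRepTok_cons (base : Int) (fe : Nat × Nat) :
    pvRepTok base fe = 'f' :: (pvRepTok base fe).drop 1 := by
  simp [pvRepTok, pvFS]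

lemma pvRepTok_drop1_nof (base : Int) (fe : Nat × Nat) :
    ∀ c ∈ (pvRepTok base fe).drop 1, c ≠ 'f' := by
  intro c hc
  have hnum := (pv_toChars_num (pvPx base fe.1 fe.2)).2
  have hd : (pvRepTok base fe).drop 1
      = ['o','n','t','-','s','i','z','e',':']
        ++ PySem.Int.toChars (pvPx base fe.1 fe.2) ++ ['p','x',';'] := by
    simp [pvRepTok, pvFS]
  rw [hd] at hc
  simp only [List.mem_append, List.mem_cons, List.not_mem_nil, or_false] at hc
  rcases hc with ((rfl|rfl|rfl|rfl|rfl|rfl|rfl|rfl|rfl) | hc') | (rfl|rfl|rfl)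
    <;> try decide
  have := pvIsNum_ne _ (hnum _ hc')
  intro rfl; revert this; decide

lemma pvRepTok_get10 (base : Int) (fe : Nat × Nat) :
    ∃ c, (pvRepTok base fe)[10]? = some c ∧ pvIsNum c := by
  obtain ⟨hne, hnum⟩ := pv_toChars_num (pvPx base fe.1 fe.2)
  obtain ⟨c0, tc, hc⟩ := List.exists_cons_of_ne_nil hne
  refine ⟨c0, ?_, hnum _ (hc ▸ List.mem_cons_self ..)⟩
  simp [pvRepTok, pvFS, hc]

lemma pvRepTok_len (base : Int) (fe : Nat × Nat) : 10 < (pvRepTok base fe).length := by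
  simp [pvRepTok, pvFS]

-- ---- PySem.Chars.replace = pvRepl for a nonempty needle ----
lemma pv_go_spec (old rep : List Char) (h : old ≠ []) :
    ∀ fuel (l acc : List Char), l.length ≤ fuel →
      PySem.Chars.replace.go old rep fuel l acc = acc.reverse ++ pvRepl old rep l := by
  intro fuel
  induction fuel with
  | zero =>
    intro l acc hl
    have : l = [] := List.eq_nil_of_length_eq_zero (by omega)
    subst this
    simp [PySem.Chars.replace.go, pvRepl]
  | succ g ih =>
    intro l acc hl
    match l with
    | [] => simp [PySem.Chars.replace.go, pvRepl]
    | c :: t =>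
      rw [PySem.Chars.replace.go, pvRepl]
      obtain ⟨o, os, rfl⟩ := List.exists_cons_of_ne_nil h
      by_cases hpre : (o :: os).isPrefixOf (c :: t)
      · rw [if_pos hpre, if_pos hpre]
        have hlen : ((c :: t).drop (o :: os).length).length ≤ g := by
          simp only [List.length_drop, List.length_cons] at *; omega
        rw [ih _ _ hlen]
        have : max (o :: os).length 1 = (o :: os).length := by simp
        rw [this]
        simp
      · rw [if_neg hpre, if_neg hpre]
        rw [ih t (c :: acc) (by simpa using hl)]
        simp

lemma pv_replace_eq (old rep l : List Char) (h : old ≠ []) :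
    PySem.Chars.replace l old rep = pvRepl old rep l := by
  rw [PySem.Chars.replace, if_neg (by simpa [List.isEmpty_iff] using h)]
  simpa using pv_go_spec old rep h l.length l [] le_rfl

lemma pv_foldA_eq (base : Int) :
    ∀ (ms : List (List Char × Nat × Nat)) (l : List Char),
      ms.foldl (fun acc p => PySem.Chars.replace acc (pvTok p.1) (pvRepTok base p.2)) l
        = pvFoldR base ms l := by
  intro ms
  induction ms with
  | nil => intro l; rfl
  | cons p ms ih =>
    intro l
    simp only [pvFoldR, List.foldl_cons] at *
    rw [pv_replace_eq _ _ _ (pvTok_ne_nil p.1), ih]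

-- ---- behaviour of pvRepl ----
lemma pvRepl_nil (old rep : List Char) : pvRepl old rep [] = [] := by rw [pvRepl]

lemma pvRepl_cons_neg (old rep : List Char) (c : Char) (t : List Char)
    (h : ¬ old <+: (c :: t)) : pvRepl old rep (c :: t) = c :: pvRepl old rep t := by
  rw [pvRepl, if_neg (by simpa [List.isPrefixOf_iff_prefix] using h)]

lemma pvRepl_cons_pos (old rep : List Char) (c : Char) (t : List Char) (hne : old ≠ [])
    (h : old <+: (c :: t)) :
    pvRepl old rep (c :: t) = rep ++ pvRepl old rep ((c :: t).drop old.length) := by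
  rw [pvRepl, if_pos (by simpa [List.isPrefixOf_iff_prefix] using h)]
  have : max old.length 1 = old.length := by
    have : 1 ≤ old.length := by cases old; simp_all; simp
    omega
  rw [this]

-- no occurrence of `old` starts inside `b` ⇒ replace skips over `b`
lemma pvRepl_append (old rep : List Char) :
    ∀ (b w : List Char), (∀ k, k < b.length → ¬ old <+: (b.drop k ++ w)) →
      pvRepl old rep (b ++ w) = b ++ pvRepl old rep w := by
  intro b
  induction b with
  | nil => intro w _; rfl
  | cons x b ih =>
    intro w hk
    have h0 : ¬ old <+: (x :: (b ++ w)) := by simpa using hk 0 (by simp)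
    rw [List.cons_append, pvRepl_cons_neg _ _ _ _ h0,
        ih w (fun k hkb => by simpa using hk (k + 1) (by simpa using hkb)), List.cons_append]

-- a prefix of the output that contains no 'f' was already a prefix of the input
lemma pv_nf_transfer (old rep : List Char) (hold : old ≠ []) (hrep : rep = 'f' :: rep.drop 1) :
    ∀ n (l q : List Char), (∀ c ∈ q, c ≠ 'f') → l.length ≤ n →
      q <+: pvRepl old rep l → q <+: l := by
  intro n
  induction n with
  | zero =>
    intro l q hq hl
    have : l = [] := List.eq_nil_of_length_eq_zero (by omega)
    subst this; rw [pvRepl_nil]; exact fun h => h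
  | succ m ih =>
    intro l q hq hl hq2
    match l with
    | [] => rwa [pvRepl_nil] at hq2
    | c :: t =>
      by_cases hpre : old <+: (c :: t)
      · rw [pvRepl_cons_pos _ _ _ _ hold hpre] at hq2
        match q with
        | [] => exact List.nil_prefix
        | d :: q' =>
          exfalso
          obtain ⟨u, hu⟩ := hq2
          rw [hrep] at hu
          simp only [List.cons_append, List.cons.injEq] at hu
          exact hq d List.mem_cons_self hu.1
      · rw [pvRepl_cons_neg _ _ _ _ hpre] at hq2
        match q with
        | [] => exact List.nil_prefix
        | d :: q' =>
          obtain ⟨u, hu⟩ := hq2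
          simp only [List.cons_append, List.cons.injEq] at hu
          obtain ⟨rfl, hu2⟩ := hu
          exact List.cons_prefix_cons.mpr
            ⟨rfl, ih t q' (fun c hc => hq c (List.mem_cons_of_mem _ hc)) (by simpa using hl) ⟨u, hu2⟩⟩

-- ---- no token occurrence starts inside a token / a replacement ----
lemma pv_not_prefix_tok_drop {p q : List Char × Nat × Nat} (hp : p ∈ pvSizeMap)
    (hq : q ∈ pvSizeMap) (hne : p.1 ≠ q.1) (k : Nat) (hk : k < (pvTok q.1).length)
    (w : List Char) : ¬ pvTok p.1 <+: ((pvTok q.1).drop k ++ w) := by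
  match k with
  | 0 =>
    obtain ⟨n, -, h1, h2, h3⟩ := pvTok_mism p hp q hq hne
    simpa using pv_not_prefix_of_mismatch n h1 h2 h3 w
  | k + 1 =>
    have hs : ((pvTok q.1)[k + 1]?).isSome := by
      simp [List.getElem?_eq_getElem (show k + 1 < (pvTok q.1).length by omega)]
    obtain ⟨x, hx⟩ := Option.isSome_iff_exists.mp hs
    have hxm : x ∈ (pvTok q.1).drop 1 :=
      List.mem_of_getElem? (by rw [List.getElem?_drop, Nat.add_comm]; exact hx)
    have hget0 : ((pvTok q.1).drop (k + 1))[0]? = some x := by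
      rw [List.getElem?_drop]; simpa using hx
    have hf : x ≠ 'f' := pvTok_drop1_nof q hq _ hxm
    refine pv_not_prefix_of_mismatch 0 ?_ ?_ (by simp; omega) w
    · rw [pvTok_cons p hp]; simp
    · rw [pvTok_cons p hp, hget0]
      simpa using fun h => (hf h.symm).elim

lemma pv_not_prefix_rep_drop {p : List Char × Nat × Nat} (hp : p ∈ pvSizeMap)
    (base : Int) (fe : Nat × Nat) (k : Nat) (hk : k < (pvRepTok base fe).length)
    (w : List Char) : ¬ pvTok p.1 <+: ((pvRepTok base fe).drop k ++ w) := by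
  match k with
  | 0 =>
    obtain ⟨ca, ha, hca⟩ := pvTok_get10 p hp
    obtain ⟨cb, hb, hcb⟩ := pvRepTok_get10 base fe
    refine pv_not_prefix_of_mismatch 10 (by simp [ha]) ?_ (pvRepTok_len base fe) w
    rw [ha, hb]
    have hnum := pvIsNum_ne _ hcb
    intro h
    have hab : ca = cb := by simpa using h
    subst hab
    omega
  | k + 1 =>
    have hs : ((pvRepTok base fe)[k + 1]?).isSome := by
      simp [List.getElem?_eq_getElem (show k + 1 < (pvRepTok base fe).length by omega)]
    obtain ⟨x, hx⟩ := Option.isSome_iff_exists.mp hs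
    have hxm : x ∈ (pvRepTok base fe).drop 1 :=
      List.mem_of_getElem? (by rw [List.getElem?_drop, Nat.add_comm]; exact hx)
    have hget0 : ((pvRepTok base fe).drop (k + 1))[0]? = some x := by
      rw [List.getElem?_drop]; simpa using hx
    have hf : x ≠ 'f' := pvRepTok_drop1_nof base fe _ hxm
    refine pv_not_prefix_of_mismatch 0 ?_ ?_ (by simp; omega) w
    · rw [pvTok_cons p hp]; simp
    · rw [pvTok_cons p hp, hget0]
      simpa using fun h => (hf h.symm).elim

-- ---- the fold skips over a foreign token / a replacement ----
lemma pvFold_pass (base : Int) {q : List Char × Nat × Nat} (hq : q ∈ pvSizeMap) :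
    ∀ ms : List (List Char × Nat × Nat), (∀ p ∈ ms, p ∈ pvSizeMap ∧ p.1 ≠ q.1) →
      ∀ w, pvFoldR base ms (pvTok q.1 ++ w) = pvTok q.1 ++ pvFoldR base ms w := by
  intro ms
  induction ms with
  | nil => intro _ w; rfl
  | cons p ms ih =>
    intro hms w
    obtain ⟨hp, hne⟩ := hms p List.mem_cons_self
    rw [pvFoldR_cons, pvRepl_append _ _ _ _ (fun k hk => pv_not_prefix_tok_drop hp hq hne k hk w),
        pvFoldR_cons]
    exact ih (fun r hr => hms r (List.mem_cons_of_mem _ hr)) _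

lemma pvFold_rep (base base' : Int) (fe : Nat × Nat) :
    ∀ ms : List (List Char × Nat × Nat), (∀ p ∈ ms, p ∈ pvSizeMap) →
      ∀ w, pvFoldR base ms (pvRepTok base' fe ++ w) = pvRepTok base' fe ++ pvFoldR base ms w := by
  intro ms
  induction ms with
  | nil => intro _ w; rfl
  | cons p ms ih =>
    intro hms w
    have hp := hms p List.mem_cons_self
    rw [pvFoldR_cons, pvRepl_append _ _ _ _ (fun k hk => pv_not_prefix_rep_drop hp base' fe k hk w),
        pvFoldR_cons]
    exact ih (fun r hr => hms r (List.mem_cons_of_mem _ hr)) _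

lemma pvFold_nil (base : Int) : ∀ ms, pvFoldR base ms [] = [] := by
  intro ms
  induction ms with
  | nil => rfl
  | cons p ms ih => rw [pvFoldR_cons, pvRepl_nil]; exact ih

-- ---- absence of a token at the front is preserved by each pass ----
lemma pv_noTok_nil : pvNoTok [] := by
  intro q hq hpre
  exact pvTok_ne_nil q.1 (List.prefix_nil.mp hpre)

lemma pv_noTok_pres {l : List Char} (H : pvNoTok l) {p : List Char × Nat × Nat}
    (hp : p ∈ pvSizeMap) (base : Int) :
    pvNoTok (pvRepl (pvTok p.1) (pvRepTok base p.2) l) := by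
  match l with
  | [] => rw [pvRepl_nil]; exact pv_noTok_nil
  | c :: t =>
    rw [pvRepl_cons_neg _ _ _ _ (H p hp)]
    intro q hq hpre
    rw [pvTok_cons q hq] at hpre
    obtain ⟨rfl, htl⟩ := List.cons_prefix_cons.mp hpre
    have : (pvTok q.1).drop 1 <+: t :=
      pv_nf_transfer _ _ (pvTok_ne_nil p.1) (pvRepTok_cons base p.2) t.length t _
        (pvTok_drop1_nof q hq) le_rfl htl
    exact H q hq (by rw [pvTok_cons q hq]; exact List.cons_prefix_cons.mpr ⟨rfl, this⟩)

lemma pvFold_cons_noTok (base : Int) :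
    ∀ ms : List (List Char × Nat × Nat), (∀ p ∈ ms, p ∈ pvSizeMap) →
      ∀ c t, pvNoTok (c :: t) → pvFoldR base ms (c :: t) = c :: pvFoldR base ms t := by
  intro ms
  induction ms with
  | nil => intro _ c t _; rfl
  | cons p ms ih =>
    intro hms c t H
    have hp := hms p List.mem_cons_self
    rw [pvFoldR_cons, pvRepl_cons_neg _ _ _ _ (H p hp), pvFoldR_cons]
    have := pv_noTok_pres H hp base
    rw [pvRepl_cons_neg _ _ _ _ (H p hp)] at this
    exact ih (fun r hr => hms r (List.mem_cons_of_mem _ hr)) c _ this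

-- ---- behaviour of B's scan ----
lemma altGo_nil (base : Int) : altGo base [] = [] := by rw [altGo]

lemma altHit_none {c : Char} {t : List Char} (H : pvNoTok (c :: t)) : altHit (c :: t) = none := by
  unfold altHit
  rw [pv_altMap_eq, pv_altPrefix_eq]
  split
  case isFalse => rfl
  case isTrue hcond =>
    obtain ⟨hsw, hlen⟩ := hcond
    cases hg : PySem.Dict.get? (PySem.Dict.mk pvSizeMap)
        (((c :: t).drop 10).takeWhile (fun x => x ≠ ';')) with
    | none => rfl
    | some fe =>
      exfalso
      set nm := ((c :: t).drop 10).takeWhile (fun x => x ≠ ';') with hnm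
      have hmem : (nm, fe) ∈ pvSizeMap :=
        PySem.Dict.mem_items_of_get?_eq_some _ hg
      have hpre : pvFS <+: (c :: t) := (PySem.Chars.startswith_iff _ _).mp hsw
      have h10 : List.drop 10 (c :: t) = List.drop pvFS.length (c :: t) := rfl
      have hsplit : pvFS ++ List.drop 10 (c :: t) = c :: t := by
        rw [h10]; exact (List.prefix_append_drop hpre).symm
      have hdw : List.drop 10 (c :: t) = nm ++ ((c :: t).drop 10).dropWhile (fun x => x ≠ ';') := by
        rw [hnm, List.takeWhile_append_dropWhile]
      have hne : ((c :: t).drop 10).dropWhile (fun x => x ≠ ';') ≠ [] := by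
        intro h
        rw [h, List.append_nil] at hdw
        rw [← hdw] at hlen
        omega
      have hhead : (((c :: t).drop 10).dropWhile (fun x => x ≠ ';')).head hne = ';' := by
        have := List.head_dropWhile_not (fun x => x ≠ ';') hne
        simpa using this
      have hcons := (List.cons_head_tail hne).symm
      rw [hhead] at hcons
      apply H (nm, fe) hmem
      refine ⟨(((c :: t).drop 10).dropWhile (fun x => x ≠ ';')).tail, ?_⟩
      calc pvTok nm ++ (((c :: t).drop 10).dropWhile (fun x => x ≠ ';')).tail
          = pvFS ++ (nm ++ ';' :: (((c :: t).drop 10).dropWhile (fun x => x ≠ ';')).tail) := by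
            simp [pvTok]
        _ = pvFS ++ List.drop 10 (c :: t) := by conv_rhs => rw [hdw, hcons]
        _ = c :: t := hsplit

lemma altGo_cons_noTok (base : Int) {c : Char} {t : List Char} (H : pvNoTok (c :: t)) :
    altGo base (c :: t) = c :: altGo base t := by
  rw [altGo, altHit_none H]

lemma pv_takeWhile_pre {nm : List Char} (hnm : ∀ x ∈ nm, x ≠ ';') (v : List Char) :
    (nm ++ ';' :: v).takeWhile (fun x => x ≠ ';') = nm := by
  induction nm with
  | nil => simp
  | cons a nm ih =>
    rw [List.cons_append, List.takeWhile_cons, if_pos (by simpa using hnm a List.mem_cons_self),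
        ih (fun x hx => hnm x (List.mem_cons_of_mem _ hx))]

lemma altHit_tok {nm : List Char} {fe : Nat × Nat} (hmem : (nm, fe) ∈ pvSizeMap) (v : List Char) :
    altHit (pvTok nm ++ v) = some fe ∧ (pvTok nm ++ v).drop 10 = nm ++ ';' :: v := by
  have hdrop : (pvTok nm ++ v).drop 10 = nm ++ ';' :: v := by
    have : pvTok nm ++ v = pvFS ++ (nm ++ ';' :: v) := by
      simp [pvTok]
    rw [this]
    have h10 : (10 : Nat) = pvFS.length := rfl
    rw [h10, List.drop_left]
  refine ⟨?_, hdrop⟩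
  have htw : (nm ++ ';' :: v).takeWhile (fun x => x ≠ ';') = nm :=
    pv_takeWhile_pre (pvNmNoSemi (nm, fe) hmem) v
  have hsw : PySem.Chars.startswith (pvTok nm ++ v) pvFS = true :=
    (PySem.Chars.startswith_iff _ _).mpr ⟨nm ++ ';' :: v, by simp [pvTok]⟩
  unfold altHit
  rw [pv_altMap_eq, pv_altPrefix_eq, hdrop, htw, if_pos ⟨hsw, by simp⟩]
  exact PySem.Dict.get?_of_mem_items _ hmem pvKeysNodup

lemma altGo_tok (base : Int) {nm : List Char} {fe : Nat × Nat}
    (hmem : (nm, fe) ∈ pvSizeMap) (v : List Char) :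
    altGo base (pvTok nm ++ v) = pvRepTok base fe ++ altGo base v := by
  obtain ⟨hhit, hdrop⟩ := altHit_tok hmem v
  have hcons : pvTok nm ++ v = 'f' :: ((pvTok nm).drop 1 ++ v) := by
    rw [pvTok_cons (nm, fe) hmem]; rfl
  rw [hcons, altGo, ← hcons, hhit, hdrop,
      pv_takeWhile_pre (pvNmNoSemi (nm, fe) hmem) v, List.drop_length_add_append]
  show altRep base fe ++ altGo base v = pvRepTok base fe ++ altGo base v
  rw [pv_altRep_eq]

-- ---- one replacement pass eats its own token at the front ----
lemma pvRepl_self {p : List Char × Nat × Nat} (hp : p ∈ pvSizeMap) (rep Y : List Char) :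
    pvRepl (pvTok p.1) rep (pvTok p.1 ++ Y) = rep ++ pvRepl (pvTok p.1) rep Y := by
  have hcons : pvTok p.1 ++ Y = 'f' :: ((pvTok p.1).drop 1 ++ Y) := by
    rw [pvTok_cons p hp]; rfl
  rw [hcons, pvRepl_cons_pos _ _ _ _ (pvTok_ne_nil p.1) (by rw [← hcons]; exact List.prefix_append _ _), ← hcons]
  rw [List.drop_left]

-- ---- the main equivalence, by strong induction on the string ----
lemma pv_main (base : Int) : ∀ n (l : List Char), l.length ≤ n →
    pvFoldR base pvSizeMap l = altGo base l := by
  intro n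
  induction n with
  | zero =>
    intro l hl
    have : l = [] := List.eq_nil_of_length_eq_zero (by omega)
    subst this
    rw [pvFold_nil base pvSizeMap, altGo_nil]
  | succ m ih =>
    intro l hl
    match l with
    | [] => rw [pvFold_nil base pvSizeMap, altGo_nil]
    | c :: t =>
      by_cases htok : ∃ p, p ∈ pvSizeMap ∧ pvTok p.1 <+: (c :: t)
      · obtain ⟨p, hp, hpre⟩ := htok
        have hv : pvTok p.1 ++ (c :: t).drop (pvTok p.1).length = c :: t :=
          (List.prefix_append_drop hpre).symm
        set v := (c :: t).drop (pvTok p.1).length with hvdef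
        have hvlen : v.length ≤ m := by
          have h11 := (pvTok_len p hp).1
          simp only [hvdef, List.length_drop, List.length_cons] at *
          omega
        obtain ⟨pre, post, hms⟩ := List.mem_iff_append.mp hp
        have hnd := pvKeysNodup
        rw [hms] at hnd
        simp only [List.map_append, List.map_cons, List.nodup_append, List.nodup_cons] at hnd
        have hpreks : ∀ q ∈ pre, q ∈ pvSizeMap ∧ q.1 ≠ p.1 := by
          intro q hq
          refine ⟨hms ▸ List.mem_append_left _ hq, fun he => ?_⟩
          exact hnd.2.2 q.1 (List.mem_map_of_mem hq) p.1 List.mem_cons_self he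
        have hpostks : ∀ q ∈ post, q ∈ pvSizeMap := by
          intro q hq
          exact hms ▸ List.mem_append_right _ (List.mem_cons_of_mem _ hq)
        calc pvFoldR base pvSizeMap (c :: t)
            = pvFoldR base (pre ++ p :: post) (pvTok p.1 ++ v) := by rw [hms, hv]
          _ = pvFoldR base (p :: post) (pvFoldR base pre (pvTok p.1 ++ v)) := by
              simp [pvFoldR, List.foldl_append]
          _ = pvFoldR base (p :: post) (pvTok p.1 ++ pvFoldR base pre v) := by
              rw [pvFold_pass base hp pre hpreks v]
          _ = pvFoldR base post
                (pvRepTok base p.2 ++ pvRepl (pvTok p.1) (pvRepTok base p.2) (pvFoldR base pre v)) := by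
              simp only [pvFoldR, List.foldl_cons]
              rw [pvRepl_self hp]
          _ = pvRepTok base p.2
                ++ pvFoldR base post (pvRepl (pvTok p.1) (pvRepTok base p.2) (pvFoldR base pre v)) := by
              rw [pvFold_rep base base p.2 post hpostks]
          _ = pvRepTok base p.2 ++ pvFoldR base (pre ++ p :: post) v := by
              simp [pvFoldR, List.foldl_append]
          _ = pvRepTok base p.2 ++ altGo base v := by rw [← hms, ih v hvlen]
          _ = altGo base (pvTok p.1 ++ v) := (altGo_tok base (by simpa using hp) v).symm
          _ = altGo base (c :: t) := by rw [hv]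
      · have H : pvNoTok (c :: t) := by
          intro q hq hpre
          exact htok ⟨q, hq, hpre⟩
        rw [pvFold_cons_noTok base pvSizeMap (fun p hp => hp) c t H,
            ih t (by simpa using hl), altGo_cons_noTok base H]

-- ===== VERDICT (by name: the statement is the Claim_ definition above) =====
theorem replace_relative_font_sizes_py_spec : Claim_equal_replace_relative_font_sizes_py := by
  intro s base _
  show _ = _
  unfold replace_relative_font_sizes_py replace_relative_font_sizes_py_alt
  rw [pv_foldA_eq base pvSizeMap s.toList,
      pv_main base s.toList.length s.toList le_rfl]
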